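-- pv_equiv track=rewrite | github.com/Kevinrobot34/atcoder | abc/abc_126_211/abc167/f.py | func
-- ===== SOURCE A (Python) =====
-- def func(l):
--     # l = [(f, m)]
--     l.sort(key=lambda x: -x[1])
--     v = 0
--     for fi, mi in l:
--         if v + mi >= 0:
--             v += fi
--         else:
--             return -1
--     return v
-- ===== SOURCE B (Python) =====
-- def func(l):
--     # l = [(f, m)]
--     l.sort(key=lambda x: -x[1])
--     # Reverse pass: s = suffix sum of f, mx = max over suffix of (suffix_sum_i - m_i).
--     # Feasible iff mx <= total, since prefix_before(i) + m_i = total - suffix_i + m_i.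
--     s = 0
--     mx = None
--     for f, m in reversed(l):
--         s += f
--         t = s - m
--         if mx is None or t > mx:
--             mx = t
--     if mx is not None and mx > s:
--         return -1
--     return s
-- ===== Notes on version B (the rewrite author's own statement) =====
-- stated objective: alternative
-- what changed: Replaces A's left-to-right greedy prefix check with early return by a single reverse pass that maintains the maximum of (suffix f-sum minus m); feasibility becomes the closed test max <= total, answered after the loop.
import Mathlib
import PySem

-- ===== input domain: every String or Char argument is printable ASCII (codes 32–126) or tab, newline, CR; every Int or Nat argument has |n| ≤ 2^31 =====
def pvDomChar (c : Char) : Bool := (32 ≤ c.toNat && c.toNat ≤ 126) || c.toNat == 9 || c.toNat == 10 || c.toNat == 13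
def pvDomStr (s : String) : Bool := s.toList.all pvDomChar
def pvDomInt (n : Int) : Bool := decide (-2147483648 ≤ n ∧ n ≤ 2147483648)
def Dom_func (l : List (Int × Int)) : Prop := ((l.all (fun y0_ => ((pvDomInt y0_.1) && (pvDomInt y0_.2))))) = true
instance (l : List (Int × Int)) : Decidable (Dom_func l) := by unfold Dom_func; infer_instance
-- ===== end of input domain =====

-- B replaces A's left-to-right greedy prefix loop (early return) with one reverse pass
-- maintaining the maximum of (suffix f-sum minus m), then the closed test max ≤ total.
-- Both Pythons sort l IN PLACE (same mutation); the equivalence proved is about the return value.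

-- ===== PORT A =====
-- the greedy for-loop of A: v accumulates, early return -1
def funcLoopA : Int → List (Int × Int) → Int
  | v, [] => v
  | v, (fi, mi) :: rest => if v + mi ≥ 0 then funcLoopA (v + fi) rest else -1

def func (l : List (Int × Int)) : Int :=
  let s := PySem.List.sorted l (key := fun x => -x.2)
  funcLoopA 0 s

-- ===== PORT B =====
-- the reversed for-loop of Source B: state (s, mx), s = running f-sum, mx = running max of s - m
def funcStepB (st : Int × Option Int) (p : Int × Int) : Int × Option Int :=
  let s := st.1 + p.1
  let t := s - p.2
  (s, match st.2 with
      | none => some t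
      | some mx => if t > mx then some t else some mx)

def func_alt (l : List (Int × Int)) : Int :=
  let srt := PySem.List.sorted l (key := fun x => -x.2)
  let st := srt.reverse.foldl funcStepB (0, none)
  match st.2 with
  | none => st.1
  | some mx => if mx > st.1 then -1 else st.1

-- ===== PRECONDITION & SPEC =====
def Spec_func (l : List (Int × Int)) (out : Int) : Prop := out = func_alt l
instance (l : List (Int × Int)) (out : Int) : Decidable (Spec_func l out) := by unfold Spec_func; infer_instance

-- ===== CLAIM (what is proved, stated in full; the proofs are below) =====
def Claim_equal_func : Prop := ∀ (l : List (Int × Int)), Dom_func l → Spec_func l (func l)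

-- ===== LEMMAS AND PROOFS =====

-- intrinsic right-to-left characterization of B's reversed fold
def msuf : List (Int × Int) → Int × Option Int
  | [] => (0, none)
  | p :: rest => funcStepB (msuf rest) p

lemma foldB_reverse (s : List (Int × Int)) :
    s.reverse.foldl funcStepB (0, none) = msuf s := by
  induction s with
  | nil => rfl
  | cons p rest ih =>
    simp [List.reverse_cons, List.foldl_append, ih, msuf]

lemma funcLoopA_eq (s : List (Int × Int)) : ∀ (v : Int),
    funcLoopA v s =
      (match (msuf s).2 with
       | none => v + (msuf s).1
       | some mx => if mx > v + (msuf s).1 then -1 else v + (msuf s).1) := by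
  induction s with
  | nil => intro v; simp [funcLoopA, msuf]
  | cons hd tl ih =>
    intro v
    obtain ⟨fi, mi⟩ := hd
    simp only [funcLoopA, msuf, funcStepB]
    by_cases h : v + mi ≥ 0
    · rw [if_pos h, ih (v + fi)]
      cases hm : (msuf tl).2 with
      | none =>
        have : ¬ ((msuf tl).1 + fi - mi > v + ((msuf tl).1 + fi)) := by omega
        simp only [this, if_false]
        ring_nf
      | some mx =>
        by_cases h2 : (msuf tl).1 + fi - mi > mx
        · simp only [h2, if_true]
          have : ¬ ((msuf tl).1 + fi - mi > v + ((msuf tl).1 + fi)) := by omega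
          simp only [this, if_false]
          by_cases h3 : mx > v + fi + (msuf tl).1
          · omega
          · simp only [h3, if_false]
            ring_nf
        · simp only [h2, if_false]
          by_cases h3 : mx > v + fi + (msuf tl).1
          · have : mx > v + ((msuf tl).1 + fi) := by omega
            simp [h3, this]
          · have : ¬ (mx > v + ((msuf tl).1 + fi)) := by omega
            simp only [h3, if_false, this, if_false]
            ring_nf
    · rw [if_neg h]
      cases hm : (msuf tl).2 with
      | none =>
        have : (msuf tl).1 + fi - mi > v + ((msuf tl).1 + fi) := by omega
        simp [this]
      | some mx =>
        by_cases h2 : (msuf tl).1 + fi - mi > mx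
        · have : (msuf tl).1 + fi - mi > v + ((msuf tl).1 + fi) := by omega
          simp [h2, this]
        · have : mx > v + ((msuf tl).1 + fi) := by omega
          simp [h2, this]

-- ===== VERDICT (by name: the statement is the Claim_ definition above) =====
theorem func_spec : Claim_equal_func := by
  intro l _
  unfold Spec_func func func_alt
  simp only []
  rw [foldB_reverse, funcLoopA_eq]
  cases hm : (msuf (PySem.List.sorted l (key := fun x => -x.2))).2 with
  | none => simp
  | some mx => simp
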